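-- pv_equiv track=rewrite | github.com/SocialFinanceDigitalLabs/AdventOfCode | solutions/2021/pughmds/day03/main.py | getGammaRate
-- ===== SOURCE A (Python) =====
-- def getBitCount(values):
--     initial = [0] * len(values[0])
--
--     for v in values:
--         for idx, pos in enumerate(v):
--             initial[idx] += int(pos)
--
--     return initial
--
-- def getGammaRate(values):
--     valueCount = len(values)
--     initial = getBitCount(values)
--
--     for idx, v in enumerate(initial):
--         if v >= (valueCount / 2):
--             initial[idx] = '1'
--         else:
--             initial[idx] = '0'
--
--     return ''.join(initial)
-- ===== SOURCE B (Python) =====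
-- from itertools import zip_longest
--
-- def getGammaRate(values):
--     n = len(values)
--     return ''.join(
--         '1' if 2 * sum(int(c) for c in col) >= n else '0'
--         for col in zip_longest(*values, fillvalue='0')
--     )
-- ===== Notes on version B (the rewrite author's own statement) =====
-- stated objective: simpler
-- what changed: B transposes the input with zip_longest and decides each output bit directly from its column sum in one column-major comprehension, instead of A's row-major mutable accumulator pass followed by a second threshold pass.
-- crash fix: On empty input A raises IndexError (len(values[0])) and on inputs with a row longer than the first A raises IndexError on the accumulator; B returns the gamma string over all columns ('' for empty input). — e.g. on getGammaRate([]): A raises IndexError, B returns ""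
import Mathlib
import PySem

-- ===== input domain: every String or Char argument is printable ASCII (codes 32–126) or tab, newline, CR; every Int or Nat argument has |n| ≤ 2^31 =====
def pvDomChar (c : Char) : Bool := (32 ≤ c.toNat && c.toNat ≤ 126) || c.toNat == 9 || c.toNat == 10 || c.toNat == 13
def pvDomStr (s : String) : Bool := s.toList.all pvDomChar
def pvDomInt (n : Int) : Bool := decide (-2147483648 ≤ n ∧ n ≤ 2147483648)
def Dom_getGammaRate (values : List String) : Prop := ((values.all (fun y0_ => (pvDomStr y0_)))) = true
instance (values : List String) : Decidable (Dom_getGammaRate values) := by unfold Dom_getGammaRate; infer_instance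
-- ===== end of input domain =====

-- B computes each output bit directly from its column sum via a zip_longest transpose (one
-- column-major pass) instead of A's row-major mutable accumulator plus a second threshold pass;
-- same cost, simpler shape. Return-value equivalence only (A mutates no argument).

-- ===== PORT A =====
-- int(pos) for a one-character string (exact: PySem.Int.ofStr?; Pre_ guarantees a digit, so `some`)
def pvIntOfChar (c : Char) : Int := (PySem.Int.ofStr? (String.mk [c])).getD 0

def getBitCount (values : List String) : List Int :=
  values.foldl
    (fun acc v =>
      (PySem.List.enumerate v.toList).foldl
        (fun a p => a.set p.1.toNat (a.getD p.1.toNat 0 + pvIntOfChar p.2)) acc)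
    (List.replicate (values.headD "").toList.length 0)

def getGammaRate (values : List String) : String :=
  let valueCount : Int := values.length
  -- Python mutates `initial` in place to '1'/'0' strings and joins; elementwise that is this map
  -- (v >= valueCount/2 over exact float halves of an int ↔ 2*v ≥ valueCount)
  String.mk ((getBitCount values).map (fun v => if 2 * v ≥ valueCount then '1' else '0'))

-- ===== PORT B =====
def getGammaRate_alt (values : List String) : String :=
  let rows := values.map String.toList
  -- zip_longest(*values, fillvalue='0'): max-row-length columns, short rows padded with '0'
  let width := rows.foldl (fun m r => max m r.length) 0
  let n : Int := values.length
  String.mk ((List.range width).map (fun j =>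
    if 2 * (rows.foldl (fun s r => s + pvIntOfChar (r.getD j '0')) 0) ≥ n then '1' else '0'))

-- ===== PRECONDITION & SPEC =====
-- Pre_ excludes exactly the inputs where A raises: empty input (IndexError on values[0]),
-- a row longer than the first (IndexError on the accumulator), or a non-digit character (ValueError).
def Pre_getGammaRate (values : List String) : Prop :=
  values ≠ [] ∧
    (values.all (fun v => decide (v.toList.length ≤ (values.headD "").toList.length)
        && v.toList.all (fun c => c.isDigit))) = true
instance (values : List String) : Decidable (Pre_getGammaRate values) := by
  unfold Pre_getGammaRate; infer_instance

def pvWitness_getGammaRate : List String := ["01", "10"]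

-- On empty input A raises IndexError and on all-digit inputs with a row longer than the first A
-- raises IndexError; B returns the gamma string over all columns ("" for the empty input).
def Raises_getGammaRate (values : List String) : Prop :=
  (values.all (fun v => v.toList.all (fun c => c.isDigit))) = true ∧
    (values = [] ∨ (values.any (fun v => decide ((values.headD "").toList.length < v.toList.length))) = true)
instance (values : List String) : Decidable (Raises_getGammaRate values) := by
  unfold Raises_getGammaRate; infer_instance
def pvRaiseWitness_getGammaRate : List String := []
def pvRaiseWitnessOut_getGammaRate : String := ""

def Spec_getGammaRate (values : List String) (out : String) : Prop := out = getGammaRate_alt values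
instance (values : List String) (out : String) : Decidable (Spec_getGammaRate values out) := by unfold Spec_getGammaRate; infer_instance

-- ===== CLAIM (what is proved, stated in full; the proofs are below) =====
def Claim_equal_getGammaRate : Prop := ∀ (values : List String), Dom_getGammaRate values → Pre_getGammaRate values → Spec_getGammaRate values (getGammaRate values)
def Claim_raises_getGammaRate : Prop := (∀ (values : List String), Dom_getGammaRate values → Raises_getGammaRate values → ¬ Pre_getGammaRate values) ∧ (Dom_getGammaRate (pvRaiseWitness_getGammaRate) ∧ Raises_getGammaRate (pvRaiseWitness_getGammaRate) ∧ getGammaRate_alt (pvRaiseWitness_getGammaRate) = pvRaiseWitnessOut_getGammaRate)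

-- ===== LEMMAS AND PROOFS =====

lemma pvIntOfChar_zero : pvIntOfChar '0' = 0 := by decide

-- the inner (per-row) loop of A preserves the accumulator length
lemma innerA_length (cs : List Char) (s : Int) (acc : List Int) :
    ((PySem.List.enumerate cs s).foldl
      (fun a p => a.set p.1.toNat (a.getD p.1.toNat 0 + pvIntOfChar p.2)) acc).length
      = acc.length := by
  induction cs generalizing s acc with
  | nil => simp [PySem.List.enumerate_nil]
  | cons c cs ih =>
      rw [PySem.List.enumerate_cons]
      simp only [List.foldl_cons, ih, List.length_set]

-- one row of A adds the digit value of the (zero-padded) row entry at each position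
lemma innerA_getD (cs : List Char) (s : Nat) (acc : List Int) (j : Nat)
    (h : s + cs.length ≤ acc.length) :
    ((PySem.List.enumerate cs (s : Int)).foldl
      (fun a p => a.set p.1.toNat (a.getD p.1.toNat 0 + pvIntOfChar p.2)) acc).getD j 0
      = acc.getD j 0 + (if s ≤ j then pvIntOfChar (cs.getD (j - s) '0') else 0) := by
  induction cs generalizing s acc with
  | nil => simp [PySem.List.enumerate_nil, pvIntOfChar_zero]
  | cons c cs ih =>
      rw [PySem.List.enumerate_cons, List.foldl_cons]
      have hcast : ((s : Int) + 1) = ((s + 1 : Nat) : Int) := by push_cast; ring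
      rw [hcast, ih (s + 1) _ (by rw [List.length_set]; simp at h; omega)]
      have hs : s < acc.length := by simp at h; omega
      by_cases hj : j = s
      · subst hj
        simp [List.getD, List.getElem?_set_self hs, Int.toNat_natCast]
      · have hset : (acc.set s ((acc.getD s 0 + pvIntOfChar c))).getD j 0 = acc.getD j 0 := by
          simp [List.getD, List.getElem?_set_ne (by omega : s ≠ j)]
        simp only [Int.toNat_natCast] at *
        rw [hset]
        by_cases hle : s ≤ j
        · have h1 : s + 1 ≤ j := by omega
          have h2 : j - s = (j - (s + 1)) + 1 := by omega
          simp [hle, h1, h2]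
        · simp [hle]
          intro h'
          exact absurd h' (by omega)

-- A's outer loop preserves the accumulator length
lemma outerA_length (vs : List String) (acc : List Int) :
    (vs.foldl
      (fun acc v => (PySem.List.enumerate v.toList).foldl
        (fun a p => a.set p.1.toNat (a.getD p.1.toNat 0 + pvIntOfChar p.2)) acc) acc).length
      = acc.length := by
  induction vs generalizing acc with
  | nil => rfl
  | cons v vs ih => rw [List.foldl_cons, ih, innerA_length]

-- B's column sum started at x is x plus the column sum started at 0
lemma colsum_shift (rows : List (List Char)) (j : Nat) (x : Int) :
    rows.foldl (fun s r => s + pvIntOfChar (r.getD j '0')) x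
      = x + rows.foldl (fun s r => s + pvIntOfChar (r.getD j '0')) 0 := by
  induction rows generalizing x with
  | nil => simp
  | cons r rows ih => rw [List.foldl_cons, List.foldl_cons, ih, ih (0 + _)]; ring

-- A's accumulated count at position j is the initial value plus B's column sum at j
lemma outerA_getD (vs : List String) (acc : List Int) (j : Nat)
    (h : ∀ v ∈ vs, v.toList.length ≤ acc.length) :
    (vs.foldl
      (fun acc v => (PySem.List.enumerate v.toList).foldl
        (fun a p => a.set p.1.toNat (a.getD p.1.toNat 0 + pvIntOfChar p.2)) acc) acc).getD j 0
      = acc.getD j 0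
        + (vs.map String.toList).foldl (fun s r => s + pvIntOfChar (r.getD j '0')) 0 := by
  induction vs generalizing acc with
  | nil => simp
  | cons v vs ih =>
      rw [List.foldl_cons, List.map_cons, List.foldl_cons]
      rw [ih _ (by intro w hw; rw [innerA_length]; exact h w (List.mem_cons_of_mem _ hw))]
      have := innerA_getD v.toList 0 acc j (by simpa using h v (List.mem_cons_self ..))
      simp only [Nat.cast_zero, Nat.zero_le, if_true, Nat.sub_zero] at this
      rw [this, colsum_shift _ j (0 + pvIntOfChar (v.toList.getD j '0'))]; ring

-- the width fold is bounded by w when every row is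
lemma fmax_le (rows : List (List Char)) (w m : Nat) (hm : m ≤ w)
    (h : ∀ r ∈ rows, r.length ≤ w) :
    rows.foldl (fun m r => max m r.length) m ≤ w := by
  induction rows generalizing m with
  | nil => simpa
  | cons r rows ih =>
      rw [List.foldl_cons]
      exact ih _ (max_le hm (h r (List.mem_cons_self ..)))
        (fun r hr => h r (List.mem_cons_of_mem _ hr))

-- the width fold dominates its start
lemma le_fmax (rows : List (List Char)) (m : Nat) :
    m ≤ rows.foldl (fun m r => max m r.length) m := by
  induction rows generalizing m with
  | nil => simp
  | cons r rows ih =>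
      rw [List.foldl_cons]
      exact le_trans (le_max_left _ _) (ih (max m r.length))

theorem getGammaRate_equal (values : List String) (hpre : Pre_getGammaRate values) :
    getGammaRate values = getGammaRate_alt values := by
  obtain ⟨hne, hall⟩ := hpre
  simp only [List.all_eq_true, Bool.and_eq_true, decide_eq_true_eq] at hall
  have hrows := hall
  obtain ⟨v0, vs, rfl⟩ := List.exists_cons_of_ne_nil hne
  set w := v0.toList.length with hw
  have hhead : ((v0 :: vs).headD "").toList.length = w := rfl
  have hlen : ∀ v ∈ v0 :: vs, v.toList.length ≤ w := fun v hv => (hrows v hv).1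
  -- width = w
  have hwidth : ((v0 :: vs).map String.toList).foldl (fun m r => max m r.length) 0 = w := by
    apply le_antisymm
    · exact fmax_le _ w 0 (Nat.zero_le _)
        (by intro r hr; obtain ⟨v, hv, rfl⟩ := List.mem_map.1 hr; exact hlen v hv)
    · calc w = max 0 w := (Nat.zero_max w).symm
        _ ≤ _ := by
            rw [List.map_cons, List.foldl_cons]
            exact le_fmax _ _
  -- counts characterisation
  have hclen : (getBitCount (v0 :: vs)).length = w := by
    rw [getBitCount, outerA_length, hhead, List.length_replicate]
  have hcget : ∀ j, (getBitCount (v0 :: vs)).getD j 0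
      = ((v0 :: vs).map String.toList).foldl (fun s r => s + pvIntOfChar (r.getD j '0')) 0 := by
    intro j
    rw [getBitCount, outerA_getD _ _ j (by rw [hhead, List.length_replicate]; exact hlen)]
    simp [List.getD, List.getElem?_replicate]
    split <;> simp
  rw [getGammaRate, getGammaRate_alt]
  simp only [hwidth]
  congr 1
  apply List.ext_getElem
  · simp [hclen]
  · intro j h1 h2
    simp only [List.getElem_map, List.getElem_range]
    have hj : j < w := by simpa [hclen] using h1
    have : (getBitCount (v0 :: vs))[j] = (getBitCount (v0 :: vs)).getD j 0 := by
      rw [List.getD_eq_getElem _ _ (by omega)]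
    rw [this, hcget j]

-- ===== VERDICT (by name: the statement is the Claim_ definition above) =====
theorem getGammaRate_spec : Claim_equal_getGammaRate := by
  intro values _ hpre
  exact getGammaRate_equal values hpre

@[simp] theorem getGammaRate_raises : Claim_raises_getGammaRate := by
  unfold Claim_raises_getGammaRate
  refine ⟨?_, by decide⟩
  rintro values _ ⟨_, h2⟩ ⟨hne, hrows⟩
  rcases h2 with rfl | hany
  · exact hne rfl
  · simp only [List.any_eq_true, decide_eq_true_eq] at hany
    obtain ⟨v, hv, hlt⟩ := hany
    simp only [List.all_eq_true, Bool.and_eq_true, decide_eq_true_eq] at hrows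
    exact absurd (hrows v hv).1 (by omega)
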